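-- pv_equiv track=rewrite | github.com/slgeay/codingame | lab/summer-challenge-2023/04.py | find_correct_path
-- ===== SOURCE A (Python) =====
-- from typing import List
--
-- def find_correct_path(instructions: List[str], target: List[int]) -> str:
--     '''
--
--     Args:
--
--         - instructions (List[str]): The list of instructions as memorized by the mutant.
--         - target (List[int]): The coordinates (x, y) of the target.
--
--     Returns:
--
--         A string respecting the given format to fix the mutant's path.
--     '''
--     for i, instr in enumerate(instructions):
--         for command in ["FORWARD", "BACK", "TURN LEFT", "TURN RIGHT"]:
--             if instr == command:
--                 continue
--
--             pos = (0, 0)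
--             angle = (1, 0)
--             for j, instruction in enumerate(instructions):
--                 if j == i:
--                     instruction = command
--
--                 if instruction == "FORWARD":
--                     pos = (pos[0] + angle[0], pos[1] + angle[1])
--                 elif instruction == "BACK":
--                     pos = (pos[0] - angle[0], pos[1] - angle[1])
--                 elif instruction == "TURN LEFT":
--                     angle = (-angle[1], angle[0])
--                 elif instruction == "TURN RIGHT":
--                     angle = (angle[1], -angle[0])
--
--             if target == list(pos):
--                 return f"Replace instruction {i+1} with {command}"
-- ===== SOURCE B (Python) =====
-- from typing import List
--
-- def _step(pos, angle, instruction):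
--     if instruction == "FORWARD":
--         return (pos[0] + angle[0], pos[1] + angle[1]), angle
--     elif instruction == "BACK":
--         return (pos[0] - angle[0], pos[1] - angle[1]), angle
--     elif instruction == "TURN LEFT":
--         return pos, (-angle[1], angle[0])
--     elif instruction == "TURN RIGHT":
--         return pos, (angle[1], -angle[0])
--     return pos, angle
--
-- def _cmul(a, b):
--     return (a[0]*b[0] - a[1]*b[1], a[0]*b[1] + a[1]*b[0])
--
-- def find_correct_path(instructions: List[str], target: List[int]) -> str:
--     # O(n): prefix states + suffix affine transforms.
--     n = len(instructions)
--     # pref[i] = (pos, angle) after the first i original instructions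
--     pref = [((0, 0), (1, 0))]
--     for instr in instructions:
--         pos, angle = pref[-1]
--         pref.append(_step(pos, angle, instr))
--     # suf[j] = (d, r): running instructions[j:] from pos (0,0), angle (1,0)
--     # ends at pos d with angle r; from (p, a) it ends at p + a*d (complex mult).
--     suf = [((0, 0), (1, 0))] * (n + 1)
--     for j in range(n - 1, -1, -1):
--         d1, r1 = _step((0, 0), (1, 0), instructions[j])
--         d2, r2 = suf[j + 1]
--         rd = _cmul(r1, d2)
--         suf[j] = ((d1[0] + rd[0], d1[1] + rd[1]), _cmul(r1, r2))
--     for i, instr in enumerate(instructions):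
--         p, a = pref[i]
--         for command in ("FORWARD", "BACK", "TURN LEFT", "TURN RIGHT"):
--             if command == instr:
--                 continue
--             p2, a2 = _step(p, a, command)
--             d, _ = suf[i + 1]
--             ad = _cmul(a2, d)
--             fin = (p2[0] + ad[0], p2[1] + ad[1])
--             if target == list(fin):
--                 return f"Replace instruction {i+1} with {command}"
-- ===== Notes on version B (the rewrite author's own statement) =====
-- stated objective: faster
-- what changed: A re-simulates the entire instruction list for every (position, candidate command) pair; B precomputes prefix states and suffix affine transforms (displacement + rotation as complex-number pairs) once, then evaluates each candidate in O(1).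
import Mathlib
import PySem

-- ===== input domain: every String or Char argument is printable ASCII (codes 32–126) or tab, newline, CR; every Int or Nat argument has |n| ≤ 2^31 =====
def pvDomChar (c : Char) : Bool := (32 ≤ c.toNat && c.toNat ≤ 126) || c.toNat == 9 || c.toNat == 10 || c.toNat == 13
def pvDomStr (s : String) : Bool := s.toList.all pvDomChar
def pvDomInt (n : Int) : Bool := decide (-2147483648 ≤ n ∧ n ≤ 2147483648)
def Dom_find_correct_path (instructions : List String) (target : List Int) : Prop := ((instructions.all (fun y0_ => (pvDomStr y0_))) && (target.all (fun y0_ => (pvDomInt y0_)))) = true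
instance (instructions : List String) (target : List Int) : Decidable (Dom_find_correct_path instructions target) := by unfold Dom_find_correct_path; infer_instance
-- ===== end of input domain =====

-- B replaces A's O(n^2) re-simulation per candidate by O(n) prefix states plus
-- suffix affine transforms (each candidate evaluated in O(1)); return value identical.

-- ===== PORT A =====
-- literal transliteration of Source A: for each position i and candidate command,
-- re-simulate the WHOLE instruction list with instruction i replaced.
def find_correct_path (instructions : List String) (target : List Int) : Option String :=
  (PySem.List.enumerate instructions).findSome? (fun p =>
    (["FORWARD", "BACK", "TURN LEFT", "TURN RIGHT"]).findSome? (fun command =>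
      if p.2 = command then none
      else
        let st := (PySem.List.enumerate instructions).foldl
          (fun (s : (Int × Int) × (Int × Int)) q =>
            let instruction := if q.1 = p.1 then command else q.2
            if instruction = "FORWARD" then ((s.1.1 + s.2.1, s.1.2 + s.2.2), s.2)
            else if instruction = "BACK" then ((s.1.1 - s.2.1, s.1.2 - s.2.2), s.2)
            else if instruction = "TURN LEFT" then (s.1, (-s.2.2, s.2.1))
            else if instruction = "TURN RIGHT" then (s.1, (s.2.2, -s.2.1))
            else s)
          ((0, 0), (1, 0))
        if target = [st.1.1, st.1.2] then
          some ("Replace instruction " ++ PySem.Int.toStr (p.1 + 1) ++ " with " ++ command)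
        else none))

-- ===== PORT B =====
-- helper _step of Source B
def pvStep (pos angle : Int × Int) (instruction : String) : (Int × Int) × (Int × Int) :=
  if instruction = "FORWARD" then ((pos.1 + angle.1, pos.2 + angle.2), angle)
  else if instruction = "BACK" then ((pos.1 - angle.1, pos.2 - angle.2), angle)
  else if instruction = "TURN LEFT" then (pos, (-angle.2, angle.1))
  else if instruction = "TURN RIGHT" then (pos, (angle.2, -angle.1))
  else (pos, angle)

-- helper _cmul of Source B (complex multiplication on Int pairs)
def pvCmul (a b : Int × Int) : Int × Int := (a.1 * b.1 - a.2 * b.2, a.1 * b.2 + a.2 * b.1)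

-- Source B's backwards loop filling suf[]: structural recursion from the tail
def pvSuffixes : List String → List ((Int × Int) × (Int × Int))
  | [] => [((0, 0), (1, 0))]
  | instr :: rest =>
      let s := pvSuffixes rest
      let d1r1 := pvStep (0, 0) (1, 0) instr
      let d2r2 := s.headD ((0, 0), (1, 0))
      let rd := pvCmul d1r1.2 d2r2.1
      ((d1r1.1.1 + rd.1, d1r1.1.2 + rd.2), pvCmul d1r1.2 d2r2.2) :: s

-- literal transliteration of Source B: prefix states (scanl = the appending loop),
-- suffix transforms, then each candidate is checked in O(1)
def find_correct_path_alt (instructions : List String) (target : List Int) : Option String :=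
  let pref := List.scanl (fun s instr => pvStep s.1 s.2 instr) ((0, 0), (1, 0)) instructions
  let suf := pvSuffixes instructions
  (PySem.List.enumerate instructions).findSome? (fun p =>
    (["FORWARD", "BACK", "TURN LEFT", "TURN RIGHT"]).findSome? (fun command =>
      if command = p.2 then none
      else
        let pa := PySem.List.pyGetD pref p.1 ((0, 0), (1, 0))
        let st := pvStep pa.1 pa.2 command
        let d := (PySem.List.pyGetD suf (p.1 + 1) ((0, 0), (1, 0))).1
        let ad := pvCmul st.2 d
        let fin := (st.1.1 + ad.1, st.1.2 + ad.2)
        if target = [fin.1, fin.2] then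
          some ("Replace instruction " ++ PySem.Int.toStr (p.1 + 1) ++ " with " ++ command)
        else none))

-- ===== PRECONDITION & SPEC =====
def Spec_find_correct_path (instructions : List String) (target : List Int) (out : Option String) : Prop := out = find_correct_path_alt instructions target
instance (instructions : List String) (target : List Int) (out : Option String) : Decidable (Spec_find_correct_path instructions target out) := by unfold Spec_find_correct_path; infer_instance

-- ===== CLAIM (what is proved, stated in full; the proofs are below) =====
def Claim_equal_find_correct_path : Prop := ∀ (instructions : List String) (target : List Int), Dom_find_correct_path instructions target → Spec_find_correct_path instructions target (find_correct_path instructions target)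

-- ===== LEMMAS AND PROOFS =====

-- the simulation both programs perform, as a fold of pvStep
def pvSim (l : List String) (s : (Int × Int) × (Int × Int)) : (Int × Int) × (Int × Int) :=
  l.foldl (fun st q => pvStep st.1 st.2 q) s

lemma pv_findSome?_congr_mem {α β : Type} (l : List α) (f g : α → Option β)
    (h : ∀ x ∈ l, f x = g x) : l.findSome? f = l.findSome? g := by
  induction l with
  | nil => rfl
  | cons x t ih =>
      simp only [List.findSome?_cons, h x (by simp)]
      cases g x with
      | none => exact ih (fun y hy => h y (by simp [hy]))
      | some b => rfl

-- substituting at index i through enumerate = List.set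
lemma pv_map_subst_enumerate {α : Type} (l : List α) (s i : Int) (c : α) :
    (PySem.List.enumerate l s).map (fun q => if q.1 = i then c else q.2)
      = if s ≤ i then l.set (i - s).toNat c else l := by
  induction l generalizing s with
  | nil => simp [PySem.List.enumerate]
  | cons x t ih =>
      rw [PySem.List.enumerate_cons]
      simp only [List.map_cons, ih (s + 1)]
      by_cases hsi : s = i
      · have h1 : ¬ (s + 1 ≤ i) := by omega
        have h2 : (i - s).toNat = 0 := by omega
        simp [hsi]
      · by_cases hle : s ≤ i
        · have h1 : s + 1 ≤ i := by omega
          have h2 : (i - s).toNat = (i - (s + 1)).toNat + 1 := by omega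
          simp [hsi, h1, hle, h2]
        · have h1 : ¬ (s + 1 ≤ i) := by omega
          simp [hsi, h1, hle]

-- one step from (p, a) = one step from the origin, rotated by a and shifted by p
lemma pv_step_equiv (x : String) (p a : Int × Int) :
    pvStep p a x
      = ((p.1 + (pvCmul a (pvStep (0, 0) (1, 0) x).1).1,
          p.2 + (pvCmul a (pvStep (0, 0) (1, 0) x).1).2),
         pvCmul a (pvStep (0, 0) (1, 0) x).2) := by
  unfold pvStep pvCmul
  split_ifs <;> refine Prod.ext (Prod.ext ?_ ?_) (Prod.ext ?_ ?_) <;> simp <;> ring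

-- the whole simulation from (p, a) in terms of the simulation from the origin
lemma pv_sim_cons (x : String) (t : List String) (s : (Int × Int) × (Int × Int)) :
    pvSim (x :: t) s = pvSim t (pvStep s.1 s.2 x) := by
  simp [pvSim]

lemma pv_sim_equiv (l : List String) (p a : Int × Int) :
    pvSim l (p, a)
      = ((p.1 + (pvCmul a (pvSim l ((0, 0), (1, 0))).1).1,
          p.2 + (pvCmul a (pvSim l ((0, 0), (1, 0))).1).2),
         pvCmul a (pvSim l ((0, 0), (1, 0))).2) := by
  induction l generalizing p a with
  | nil =>
      simp only [pvSim, List.foldl_nil]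
      refine Prod.ext (Prod.ext ?_ ?_) (Prod.ext ?_ ?_) <;> simp [pvCmul]
  | cons x t ih =>
      rcases h : pvStep (0, 0) (1, 0) x with ⟨d1, r1⟩
      have hx := pv_step_equiv x p a
      rw [h] at hx
      simp only [pv_sim_cons]
      rw [hx]
      simp only []
      rw [show pvStep ((0, 0), (1, 0)).1 ((0, 0), (1, 0)).2 x = (d1, r1) from h]
      rw [ih (p.1 + (pvCmul a d1).1, p.2 + (pvCmul a d1).2) (pvCmul a r1), ih d1 r1]
      refine Prod.ext (Prod.ext ?_ ?_) (Prod.ext ?_ ?_) <;> simp [pvCmul] <;> ring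

-- prefix array: entry i of the scanl is the simulation of the first i instructions
lemma pv_scanl_getD_aux (l : List String) (b d : (Int × Int) × (Int × Int)) (i : Nat)
    (hi : i ≤ l.length) :
    (List.scanl (fun s instr => pvStep s.1 s.2 instr) b l).getD i d = pvSim (l.take i) b := by
  induction l generalizing b i with
  | nil =>
      have : i = 0 := Nat.le_zero.mp hi
      subst this; simp [pvSim]
  | cons x t ih =>
      cases i with
      | zero => simp [pvSim]
      | succ j =>
          simp only [List.scanl_cons, List.getD_cons_succ, List.take_succ_cons]
          rw [ih (pvStep b.1 b.2 x) j (by simpa using hi)]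
          simp [pvSim]

lemma pv_scanl_getD (l : List String) (i : Nat) (hi : i ≤ l.length) :
    (List.scanl (fun s instr => pvStep s.1 s.2 instr) ((0, 0), (1, 0)) l).getD i ((0, 0), (1, 0))
      = pvSim (l.take i) ((0, 0), (1, 0)) :=
  pv_scanl_getD_aux l _ _ i hi

-- suffix array: entry j is the simulation of the dropped list from the origin
lemma pv_suffixes_getD (l : List String) (j : Nat) (hj : j ≤ l.length) :
    (pvSuffixes l).getD j ((0, 0), (1, 0)) = pvSim (l.drop j) ((0, 0), (1, 0)) := by
  induction l generalizing j with
  | nil =>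
      have : j = 0 := Nat.le_zero.mp hj
      subst this
      simp [pvSuffixes, pvSim]
  | cons x t ih =>
      cases j with
      | zero =>
          have hhead : (pvSuffixes t).headD ((0, 0), (1, 0)) = pvSim t ((0, 0), (1, 0)) := by
            have h0 : (pvSuffixes t).getD 0 ((0, 0), (1, 0)) = pvSim t ((0, 0), (1, 0)) := by
              simpa using ih 0 (Nat.zero_le _)
            cases htl : pvSuffixes t with
            | nil => rw [htl] at h0; simpa using h0
            | cons y ys => rw [htl] at h0; simpa using h0
          simp only [pvSuffixes, List.getD_cons_zero, List.drop_zero]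
          rw [hhead]
          have hsplit : pvSim (x :: t) ((0, 0), (1, 0)) = pvSim t (pvStep (0, 0) (1, 0) x) := by
            simp [pvSim]
          rw [hsplit]
          rw [pv_sim_equiv t (pvStep (0, 0) (1, 0) x).1 (pvStep (0, 0) (1, 0) x).2]
      | succ k =>
          simp only [pvSuffixes, List.getD_cons_succ, List.drop_succ_cons]
          exact ih k (by simpa using hj)

-- B's O(1) candidate evaluation, named for the proofs
def pvBsideSt (ins : List String) (i : Int) (command : String) : (Int × Int) × (Int × Int) :=
  let pa := PySem.List.pyGetD (List.scanl (fun s instr => pvStep s.1 s.2 instr) ((0, 0), (1, 0)) ins) i ((0, 0), (1, 0))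
  pvStep pa.1 pa.2 command

def pvBsideFin (ins : List String) (i : Int) (command : String) : Int × Int :=
  let st := pvBsideSt ins i command
  let d := (PySem.List.pyGetD (pvSuffixes ins) (i + 1) ((0, 0), (1, 0))).1
  (st.1.1 + (pvCmul st.2 d).1, st.1.2 + (pvCmul st.2 d).2)

-- the key pointwise fact: for 0 ≤ i < n, A's full re-simulation with instruction i
-- replaced by `command` lands exactly where B's prefix/suffix O(1) formula says
lemma pv_key (ins : List String) (i : Int) (h0 : 0 ≤ i) (h1 : i < (ins.length : Int)) (command : String) :
    ((PySem.List.enumerate ins).foldl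
        (fun (s : (Int × Int) × (Int × Int)) q =>
          if (if q.1 = i then command else q.2) = "FORWARD" then ((s.1.1 + s.2.1, s.1.2 + s.2.2), s.2)
          else if (if q.1 = i then command else q.2) = "BACK" then ((s.1.1 - s.2.1, s.1.2 - s.2.2), s.2)
          else if (if q.1 = i then command else q.2) = "TURN LEFT" then (s.1, (-s.2.2, s.2.1))
          else if (if q.1 = i then command else q.2) = "TURN RIGHT" then (s.1, (s.2.2, -s.2.1))
          else s)
        ((0, 0), (1, 0))).1
      = pvBsideFin ins i command := by
  lift i to ℕ using h0 with n
  have hn : n < ins.length := by exact_mod_cast h1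
  have hA := List.foldl_map
    (f := fun (q : Int × String) => if q.1 = (n : Int) then command else q.2)
    (g := fun (st : (Int × Int) × (Int × Int)) (y : String) => pvStep st.1 st.2 y)
    (l := PySem.List.enumerate ins)
    (init := (((0, 0), (1, 0)) : (Int × Int) × (Int × Int)))
  refine Eq.trans ((congrArg Prod.fst hA).symm) ?_
  show (pvSim ((PySem.List.enumerate ins).map (fun q => if q.1 = (n : Int) then command else q.2)) ((0, 0), (1, 0))).1 = _
  rw [pv_map_subst_enumerate ins 0 (n : Int) command]
  rw [if_pos (by positivity), show ((n : Int) - 0).toNat = n by omega]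
  rw [List.set_eq_take_cons_drop command hn]
  have hsplit : pvSim (ins.take n ++ command :: ins.drop (n + 1)) ((0, 0), (1, 0))
      = pvSim (ins.drop (n + 1))
          (pvStep (pvSim (ins.take n) ((0, 0), (1, 0))).1 (pvSim (ins.take n) ((0, 0), (1, 0))).2 command) := by
    simp [pvSim, List.foldl_append]
  rw [hsplit]
  rw [pv_sim_equiv (ins.drop (n + 1))
        (pvStep (pvSim (ins.take n) ((0, 0), (1, 0))).1 (pvSim (ins.take n) ((0, 0), (1, 0))).2 command).1
        (pvStep (pvSim (ins.take n) ((0, 0), (1, 0))).1 (pvSim (ins.take n) ((0, 0), (1, 0))).2 command).2]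
  simp only [pvBsideFin, pvBsideSt]
  rw [show (n : Int) + 1 = ((n + 1 : Nat) : Int) by push_cast; ring]
  rw [PySem.List.pyGetD_natCast, PySem.List.pyGetD_natCast]
  rw [pv_scanl_getD ins n (le_of_lt hn), pv_suffixes_getD ins (n + 1) (by omega)]

-- ===== VERDICT (by name: the statement is the Claim_ definition above) =====
theorem find_correct_path_spec : Claim_equal_find_correct_path := by
  intro ins target _
  unfold Spec_find_correct_path find_correct_path find_correct_path_alt
  refine pv_findSome?_congr_mem _ _ _ ?_
  intro p hp
  rw [PySem.List.enumerate_eq_map_pyRange ins ""] at hp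
  obtain ⟨j, hj, rfl⟩ := List.mem_map.mp hp
  obtain ⟨hj0, hjlt⟩ := PySem.List.mem_pyRange_one.mp hj
  refine pv_findSome?_congr_mem _ _ _ ?_
  intro command _
  dsimp only
  by_cases hc : PySem.List.pyGetD ins j "" = command
  · simp [hc]
  · rw [if_neg hc, if_neg (show ¬(command = PySem.List.pyGetD ins j "") from fun h => hc h.symm)]
    have h1 : j < (ins.length : Int) := by simpa [PySem.List.len] using hjlt
    have hk := pv_key ins j hj0 h1 command
    rw [hk]
    simp only [pvBsideFin, pvBsideSt]
    rfl
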